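-- pv_equiv track=rewrite | github.com/alrlchoa/Project-Euler | Project Euler 051.py | makePermutes
-- ===== SOURCE A (Python) =====
-- import itertools as iter
--
-- def makePermutes(n,x):
--     indexes = []
--     slots = n-x
--     num = ["0","1","2","3","4","5","6","7","8","9"]
--
--     a = list(iter.combinations(num,slots))[:]
--     for k in a:
--             indexes.append(list(k))
--     return indexes
-- ===== SOURCE B (Python) =====
-- def makePermutes(n, x):
--     slots = n - x
--     # DP over digits right-to-left: table[j] holds the size-j combinations of the
--     # suffix of digits processed so far, in itertools' lexicographic order.
--     table = [[[]]] + [[] for _ in range(10)]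
--     for d in "9876543210":
--         new = [[[]]]
--         for prev, cur in zip(table, table[1:]):
--             new.append([[d] + c for c in prev] + cur)
--         table = new
--     return table[slots] if 0 <= slots <= 10 else []
-- ===== Notes on version B (the rewrite author's own statement) =====
-- stated objective: alternative
-- what changed: Replaces the itertools.combinations library call with a hand-written right-to-left DP fold over the digits that maintains, per size j, the size-j combinations of the suffix processed so far, then indexes the resulting table at slots.
import Mathlib
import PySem

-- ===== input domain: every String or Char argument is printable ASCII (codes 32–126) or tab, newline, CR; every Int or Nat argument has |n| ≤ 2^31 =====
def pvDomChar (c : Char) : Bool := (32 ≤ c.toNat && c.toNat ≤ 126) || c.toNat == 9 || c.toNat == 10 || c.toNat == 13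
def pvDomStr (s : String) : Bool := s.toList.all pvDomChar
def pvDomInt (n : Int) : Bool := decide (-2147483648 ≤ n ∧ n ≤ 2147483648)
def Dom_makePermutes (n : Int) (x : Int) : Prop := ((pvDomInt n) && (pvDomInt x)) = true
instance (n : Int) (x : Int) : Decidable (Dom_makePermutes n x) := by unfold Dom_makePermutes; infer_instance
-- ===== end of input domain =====

set_option maxRecDepth 10000
set_option maxHeartbeats 1000000

-- B replaces A's itertools.combinations call by a right-to-left dynamic-programming
-- fold that maintains, for each size j ≤ 10, the size-j combinations of the digit
-- suffix processed so far (objective: alternative algorithm of similar cost).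

-- ===== PORT A =====
-- itertools.combinations(l, r) in lexicographic (increasing-index) order
def pvCombos : List String → Nat → List (List String)
  | _, 0 => [[]]
  | [], _ + 1 => []
  | h :: t, r + 1 => (pvCombos t r).map (fun c => h :: c) ++ pvCombos t (r + 1)

def makePermutes (n : Int) (x : Int) : List (List String) :=
  let slots := n - x
  let num := ["0","1","2","3","4","5","6","7","8","9"]
  let a := pvCombos num slots.toNat   -- combinations(num, slots); Pre_ guarantees 0 ≤ slots
  a.foldl (fun indexes k => indexes ++ [k]) []

-- ===== PORT B =====
def pvStep (d : String) (table : List (List (List String))) : List (List (List String)) :=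
  [[[]]] ++ (table.zip table.tail).map (fun pc => pc.1.map (fun c => d :: c) ++ pc.2)

def makePermutes_alt (n : Int) (x : Int) : List (List String) :=
  let slots := n - x
  let table := (["9","8","7","6","5","4","3","2","1","0"]).foldl (fun t d => pvStep d t)
      ([[[]]] ++ List.replicate 10 [])
  if 0 ≤ slots ∧ slots ≤ 10 then ((PySem.List.pyGet? table slots).getD []) else []

-- ===== PRECONDITION & SPEC =====
-- Pre_ excludes exactly x > n, where itertools.combinations raises ValueError (negative r).
def Pre_makePermutes (n : Int) (x : Int) : Prop := 0 ≤ n - x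
instance (n : Int) (x : Int) : Decidable (Pre_makePermutes n x) := by unfold Pre_makePermutes; infer_instance
def pvWitness_makePermutes : Int × Int := (7, 4)

def Spec_makePermutes (n : Int) (x : Int) (out : List (List String)) : Prop := out = makePermutes_alt n x
instance (n : Int) (x : Int) (out : List (List String)) : Decidable (Spec_makePermutes n x out) := by unfold Spec_makePermutes; infer_instance

-- ===== CLAIM (what is proved, stated in full; the proofs are below) =====
def Claim_equal_makePermutes : Prop := ∀ (n : Int) (x : Int), Dom_makePermutes n x → Pre_makePermutes n x → Spec_makePermutes n x (makePermutes n x)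

-- ===== LEMMAS AND PROOFS =====
theorem pvCombos_nil_of_lt (l : List String) (r : Nat) (h : l.length < r) : pvCombos l r = [] := by
  induction l generalizing r with
  | nil => cases r with
    | zero => omega
    | succ r => rfl
  | cons h t ih =>
    cases r with
    | zero => simp at h
    | succ r =>
      simp [pvCombos]
      constructor
      · exact ih r (by simpa using h)
      · exact ih (r+1) (by simp at h ⊢; omega)

theorem pv_foldl_append (l acc : List (List String)) :
    l.foldl (fun indexes k => indexes ++ [k]) acc = acc ++ l := by
  induction l generalizing acc with
  | nil => simp
  | cons h t ih => simp [List.foldl, ih]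

theorem makePermutes_spec : Claim_equal_makePermutes := by
  unfold Claim_equal_makePermutes
  intro n x _ hpre
  unfold Spec_makePermutes makePermutes makePermutes_alt Pre_makePermutes at *
  simp only [pv_foldl_append, List.nil_append]
  by_cases h10 : n - x ≤ 10
  · rw [if_pos ⟨hpre, h10⟩]
    obtain ⟨k, hk⟩ : ∃ k : Nat, n - x = (k : Int) := ⟨(n - x).toNat, (Int.toNat_of_nonneg hpre).symm⟩
    rw [hk]
    have hk10 : k ≤ 10 := by omega
    interval_cases k <;> decide
  · rw [if_neg (by tauto)]
    apply pvCombos_nil_of_lt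
    simp
    omega
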